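-- pv_equiv track=rewrite | github.com/Ghadaala/Descending_order_brute_force | findingDescending_order.py | findingDescending_order
-- ===== SOURCE A (Python) =====
-- def findingDescending_order(arr):
--     # length of the list
--     n = len(arr)
--     # Create an ordered array or list with one element and n length
--     orders = [0] * n
--     # Looping every element in the list
--     for l in range(n):
--         # count the order to 1
--         order = 1
--         # nested loop goes through every element in the array
--         for m in range(n):
--             # If the current element (m) is larger than the element in the (l) loop, increment the order
--
--             if arr[m] > arr[l]:
--                 order += 1
--         # put the order of the current element(m) in the order list
--         orders[l] = order
--     # Return the order list
--     return orders
-- ===== SOURCE B (Python) =====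
-- def findingDescending_order(arr):
--     # Sort once (descending); the first position of a value in the sorted list
--     # equals the number of strictly greater elements, so its rank is position + 1.
--     s = sorted(arr, reverse=True)
--     first = {}
--     for i, v in enumerate(s):
--         if v not in first:
--             first[v] = i + 1
--     return [first[v] for v in arr]
-- ===== Notes on version B (the rewrite author's own statement) =====
-- stated objective: faster
-- what changed: Replaces the nested count-of-greater scan per element by one descending sort plus a first-occurrence-index dictionary, then a single lookup pass.
import Mathlib
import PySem

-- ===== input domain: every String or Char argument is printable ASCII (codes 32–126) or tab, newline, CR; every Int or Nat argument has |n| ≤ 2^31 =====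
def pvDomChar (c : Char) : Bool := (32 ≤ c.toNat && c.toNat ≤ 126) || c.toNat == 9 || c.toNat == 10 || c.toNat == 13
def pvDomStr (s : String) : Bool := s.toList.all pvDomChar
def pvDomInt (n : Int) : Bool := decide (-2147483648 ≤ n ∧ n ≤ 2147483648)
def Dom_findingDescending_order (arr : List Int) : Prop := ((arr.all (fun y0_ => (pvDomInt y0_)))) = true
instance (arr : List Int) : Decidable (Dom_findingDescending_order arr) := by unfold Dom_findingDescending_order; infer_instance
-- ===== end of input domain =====

-- B replaces A's nested count-of-greater scan by one descending sort plus a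
-- first-occurrence-index dictionary; proved to return the same list on every input.


-- ===== PORT A =====
-- arr[m], arr[l] are always in range (l, m ∈ range(n)), so pyGetD is exact here;
-- orders[l] = order is List.set at l.toNat (l ≥ 0 inside range(n)).
def findingDescending_order (arr : List Int) : List Int :=
  let n := PySem.List.len arr
  let orders := PySem.List.pyRepeat [(0 : Int)] n
  (PySem.List.pyRange 0 n 1).foldl (fun orders l =>
    let order := (PySem.List.pyRange 0 n 1).foldl (fun order m =>
      if PySem.List.pyGetD arr m 0 > PySem.List.pyGetD arr l 0 then order + 1 else order)
      (1 : Int)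
    orders.set l.toNat order) orders

-- ===== PORT B =====
-- first[v] in the final comprehension never raises (every v ∈ arr occurs in s), so get? ... getD is exact.
def findingDescending_order_alt (arr : List Int) : List Int :=
  let s := PySem.List.sorted arr (fun x => x) true
  let first := (PySem.List.enumerate s).foldl
    (fun d (iv : Int × Int) => if d.contains iv.2 then d else d.insert iv.2 (iv.1 + 1))
    PySem.Dict.empty
  arr.map (fun v => (first.get? v).getD 0)

-- ===== PRECONDITION & SPEC =====
def Spec_findingDescending_order (arr : List Int) (out : List Int) : Prop := out = findingDescending_order_alt arr
instance (arr : List Int) (out : List Int) : Decidable (Spec_findingDescending_order arr out) := by unfold Spec_findingDescending_order; infer_instance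

-- ===== CLAIM (what is proved, stated in full; the proofs are below) =====
def Claim_equal_findingDescending_order : Prop := ∀ (arr : List Int), Dom_findingDescending_order arr → Spec_findingDescending_order arr (findingDescending_order arr)

-- ===== LEMMAS AND PROOFS =====

-- the common mathematical value: rank = 1 + number of strictly greater elements
def pvRank (arr : List Int) (x : Int) : Int := 1 + (arr.countP (fun y => decide (x < y)) : Int)

-- writing each result slot: a fold over range n that sets slot l to f l
lemma pv_foldl_set_range (f : Nat → Int) :
    ∀ (n : Nat) (init : List Int), n ≤ init.length →
      (List.range n).foldl (fun os l => os.set l (f l)) init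
        = (List.range n).map f ++ init.drop n := by
  intro n
  induction n with
  | zero => intro init h; simp
  | succ n ih =>
    intro init h
    rw [List.range_succ, List.foldl_append, ih init (by omega)]
    have hlt : n < init.length := by omega
    simp only [List.foldl_cons, List.foldl_nil, List.set_append, List.length_map,
      List.length_range, lt_irrefl, if_false, Nat.sub_self]
    rw [List.drop_eq_getElem_cons hlt, List.set_cons_zero]
    simp [List.map_append]

lemma pv_map_getD_range (g : Int → Int) (arr : List Int) :
    (List.range arr.length).map (fun i => g (arr.getD i 0)) = arr.map g := by
  apply List.ext_getElem
  · simp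
  · intro i h1 h2
    have hi : i < arr.length := by simpa using h2
    simp [List.getD_eq_getElem?_getD, List.getElem?_eq_getElem hi]

lemma pv_portA_eq_map (arr : List Int) :
    findingDescending_order arr = arr.map (pvRank arr) := by
  unfold findingDescending_order
  simp only [PySem.List.len, PySem.List.pyRepeat_singleton, Int.toNat_natCast]
  have hinner : ∀ l : Int,
      (PySem.List.pyRange 0 (arr.length : Int) 1).foldl (fun order m =>
        if PySem.List.pyGetD arr m 0 > PySem.List.pyGetD arr l 0 then order + 1 else order)
        (1 : Int) = pvRank arr (PySem.List.pyGetD arr l 0) := by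
    intro l
    rw [PySem.List.foldl_ite_add_one
      (p := fun m => PySem.List.pyGetD arr m 0 > PySem.List.pyGetD arr l 0)]
    unfold pvRank
    set a := PySem.List.pyGetD arr l 0 with ha
    have hmap := PySem.List.map_pyGetD_pyRange_zero arr 0
    simp only [PySem.List.len] at hmap
    have h1 : List.countP (fun m => decide (PySem.List.pyGetD arr m 0 > a))
        (PySem.List.pyRange 0 (arr.length : Int) 1)
        = List.countP (fun y => decide (a < y)) arr := by
      conv_rhs => rw [← hmap]
      rw [List.countP_map]
      rfl
    rw [h1]
  have hcongr := PySem.List.foldl_congr_mem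
    (l := PySem.List.pyRange 0 (arr.length : Int) 1)
    (f := fun (orders : List Int) l =>
      orders.set l.toNat ((PySem.List.pyRange 0 (arr.length : Int) 1).foldl (fun order m =>
        if PySem.List.pyGetD arr m 0 > PySem.List.pyGetD arr l 0 then order + 1 else order) (1 : Int)))
    (g := fun (orders : List Int) l => orders.set l.toNat (pvRank arr (PySem.List.pyGetD arr l 0)))
    (init := List.replicate arr.length (0 : Int))
    (by intro acc x _
        show acc.set x.toNat _ = acc.set x.toNat _
        rw [hinner x])
  rw [hcongr, PySem.List.pyRange_zero_natCast, List.foldl_map]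
  simp only [Int.toNat_natCast, PySem.List.pyGetD_natCast]
  rw [pv_foldl_set_range (fun i => pvRank arr (arr.getD i 0)) arr.length
    (List.replicate arr.length 0) (by simp)]
  rw [pv_map_getD_range (pvRank arr) arr]
  simp

-- the dictionary-building fold of B
def pvStep (d : PySem.Dict Int Int) (iv : Int × Int) : PySem.Dict Int Int :=
  if d.contains iv.2 then d else d.insert iv.2 (iv.1 + 1)

lemma pv_fold_first_of_contains (t : List Int) :
    ∀ (k : Int) (d : PySem.Dict Int Int) (v : Int), d.contains v →
      ((PySem.List.enumerate t k).foldl pvStep d).get? v = d.get? v := by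
  induction t with
  | nil => intro k d v _; simp [PySem.List.enumerate_nil]
  | cons x t ih =>
    intro k d v hv
    rw [PySem.List.enumerate_cons, List.foldl_cons]
    by_cases hx : d.contains x
    · rw [show pvStep d (k, x) = d from by simp [pvStep, hx]]
      exact ih (k + 1) d v hv
    · rw [show pvStep d (k, x) = d.insert x (k + 1) from by simp [pvStep, hx]]
      have hne : v ≠ x := by
        intro h; rw [← h] at hx; exact hx hv
      have hc : (d.insert x (k + 1)).contains v := by
        simp [PySem.Dict.contains_insert, hv]
      rw [ih (k + 1) _ v hc, PySem.Dict.get?_insert_of_ne _ _ hne]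

lemma pv_fold_first_of_mem (t : List Int) :
    ∀ (k : Int) (d : PySem.Dict Int Int) (v : Int), ¬ d.contains v → v ∈ t →
      ((PySem.List.enumerate t k).foldl pvStep d).get? v = some (k + (t.idxOf v : Int) + 1) := by
  induction t with
  | nil => intro _ _ _ _ h; cases h
  | cons x t ih =>
    intro k d v hv hm
    rw [PySem.List.enumerate_cons, List.foldl_cons]
    by_cases hx : x = v
    · subst hx
      rw [show pvStep d (k, x) = d.insert x (k + 1) from by simp [pvStep, hv]]
      have hc : (d.insert x (k + 1)).contains x := by
        simp
      rw [pv_fold_first_of_contains t (k + 1) _ x hc, PySem.Dict.get?_insert_self]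
      simp [List.idxOf_cons_self]
    · have hm' : v ∈ t := by
        cases hm with
        | head => exact absurd rfl hx
        | tail _ h => exact h
      have hbeq : (x == v) = false := by simp [hx]
      have hidx : (x :: t).idxOf v = t.idxOf v + 1 := by
        rw [List.idxOf_cons, hbeq]; rfl
      by_cases hdx : d.contains x
      · rw [show pvStep d (k, x) = d from by simp [pvStep, hdx]]
        rw [ih (k + 1) d v hv hm', hidx]
        push_cast; ring_nf
      · rw [show pvStep d (k, x) = d.insert x (k + 1) from by simp [pvStep, hdx]]
        have hv' : ¬ (d.insert x (k + 1)).contains v := by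
          simp only [PySem.Dict.contains_insert, Bool.or_eq_true, beq_iff_eq]
          rintro (h | h)
          · exact hx h.symm
          · exact hv h
        rw [ih (k + 1) _ v hv' hm', hidx]
        push_cast; ring_nf

-- in a descending-sorted list, the first index of v counts the strictly greater elements
lemma pv_idxOf_desc (s : List Int) (hpw : s.Pairwise (fun a b => b ≤ a)) :
    ∀ v ∈ s, s.idxOf v = s.countP (fun y => decide (v < y)) := by
  induction s with
  | nil => intro v h; cases h
  | cons x t ih =>
    rw [List.pairwise_cons] at hpw
    intro v hv
    by_cases hx : x = v
    · subst hx
      have h0 : List.countP (fun y => decide (x < y)) t = 0 := by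
        rw [List.countP_eq_zero]
        intro y hy
        simpa using not_lt.mpr (hpw.1 y hy)
      simp [List.idxOf_cons_self, h0]
    · have hm : v ∈ t := by
        cases hv with
        | head => exact absurd rfl hx
        | tail _ h => exact h
      have hvx : v < x := lt_of_le_of_ne (hpw.1 v hm) (fun h => hx h.symm)
      have hbeq : (x == v) = false := by simp [hx]
      rw [List.idxOf_cons, hbeq, List.countP_cons]
      simp [hvx, ih hpw.2 v hm, Nat.add_comm]

lemma pv_portB_eq_map (arr : List Int) :
    findingDescending_order_alt arr = arr.map (pvRank arr) := by
  unfold findingDescending_order_alt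
  apply List.map_congr_left
  intro v hv
  have hperm := PySem.List.sorted_perm arr (fun x => x) true
  have hpw := PySem.List.sorted_pairwise_rev arr (fun x => x)
  set s := PySem.List.sorted arr (fun x => x) true with hs
  have hvs : v ∈ s := hperm.mem_iff.mpr hv
  have hget := pv_fold_first_of_mem s 0 PySem.Dict.empty v (by simp) hvs
  have hstep : (fun (d : PySem.Dict Int Int) (iv : Int × Int) =>
      if d.contains iv.2 then d else d.insert iv.2 (iv.1 + 1)) = pvStep := rfl
  rw [hstep, hget]
  have hidx := pv_idxOf_desc s hpw v hvs
  have hcnt : s.countP (fun y => decide (v < y)) = arr.countP (fun y => decide (v < y)) :=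
    hperm.countP_eq _
  simp only [Option.getD_some, pvRank, hidx, hcnt]
  ring

-- ===== VERDICT (by name: the statement is the Claim_ definition above) =====
theorem findingDescending_order_spec : Claim_equal_findingDescending_order := by
  intro arr _
  unfold Spec_findingDescending_order
  rw [pv_portA_eq_map, pv_portB_eq_map]
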